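-- pv_equiv track=rewrite | github.com/kachofugetsu09/akashic-agent | memory2/query_builder.py | build_procedure_queries
-- ===== SOURCE A (Python) =====
-- def build_procedure_queries(user_msg: str, rewritten_query: str = "") -> list[str]:
--     """为 procedure/preference 检索生成原始 query 和改写 query。"""
--     msg = _normalize_text(user_msg)
--     rewritten = _normalize_text(rewritten_query)
--     queries = [item for item in (msg, rewritten) if item]
--     if not queries:
--         return []
--     seen: set[str] = set()
--     deduped: list[str] = []
--     for item in queries:
--         if item in seen:
--             continue
--         seen.add(item)
--         deduped.append(item)
--     return deduped
--
-- def _normalize_text(text: str) -> str: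
--     return " ".join(str(text or "").split())
-- ===== SOURCE B (Python) =====
-- def build_procedure_queries(user_msg: str, rewritten_query: str = "") -> list[str]:
--     # Work at the token level: split both inputs into word lists, drop the
--     # duplicate/empty word list directly, and only join into strings at the end.
--     w1 = str(user_msg or "").split()
--     w2 = str(rewritten_query or "").split()
--     if not w1:
--         w1, w2 = w2, []
--     elif w2 == w1:
--         w2 = []
--     return [" ".join(w) for w in (w1, w2) if w]
-- ===== Notes on version B (the rewrite author's own statement) =====
-- stated objective: alternative
-- what changed: B works at the token level: it splits both inputs into word lists, drops the empty or duplicate word list by direct list comparison (with a swap when the first is empty), and joins into normalized strings only at the end, instead of A's normalize-first comprehension plus set-based dedup loop over strings.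
import Mathlib
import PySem

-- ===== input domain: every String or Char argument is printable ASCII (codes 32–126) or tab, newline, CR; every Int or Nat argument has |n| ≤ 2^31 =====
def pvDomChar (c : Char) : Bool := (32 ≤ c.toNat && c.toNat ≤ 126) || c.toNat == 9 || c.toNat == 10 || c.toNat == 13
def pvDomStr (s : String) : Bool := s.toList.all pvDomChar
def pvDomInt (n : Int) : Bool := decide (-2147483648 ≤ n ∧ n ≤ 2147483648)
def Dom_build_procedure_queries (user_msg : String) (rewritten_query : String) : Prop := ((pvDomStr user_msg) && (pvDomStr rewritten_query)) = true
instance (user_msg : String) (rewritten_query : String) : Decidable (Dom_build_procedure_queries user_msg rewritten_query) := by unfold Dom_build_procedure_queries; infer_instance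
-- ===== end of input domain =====

-- B works at the token level: it splits both inputs into word lists, drops the empty/duplicate word list directly, and only joins into strings at the end (objective: alternative decomposition, same cost).


-- ===== PORT A =====
-- _normalize_text(text) = " ".join(str(text or "").split())
def pvNorm (text : String) : String := PySem.Str.join " " (PySem.Str.split₀ text)

def build_procedure_queries (user_msg : String) (rewritten_query : String) : List String :=
  let msg := pvNorm user_msg
  let rewritten := pvNorm rewritten_query
  let queries := [msg, rewritten].filter (fun item => !(item == ""))
  if queries = [] then []
  else
    let st := queries.foldl
      (fun (acc : PySem.Set String × List String) item =>
        if item ∈ acc.1 then acc else (acc.1.add item, acc.2 ++ [item]))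
      (PySem.Set.ofList [], [])
    st.2

-- ===== PORT B =====
-- token level: split into word lists, drop the empty / duplicate word list, join at the end
def build_procedure_queries_alt (user_msg : String) (rewritten_query : String) : List String :=
  let w1 := PySem.Str.split₀ user_msg
  let w2 := PySem.Str.split₀ rewritten_query
  let p : List String × List String :=
    if w1 = [] then (w2, [])
    else if w2 = w1 then (w1, [])
    else (w1, w2)
  ([p.1, p.2].filter (fun w => !(w == []))).map (fun w => PySem.Str.join " " w)

-- ===== PRECONDITION & SPEC =====
def Spec_build_procedure_queries (user_msg : String) (rewritten_query : String) (out : List String) : Prop := out = build_procedure_queries_alt user_msg rewritten_query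
instance (user_msg : String) (rewritten_query : String) (out : List String) : Decidable (Spec_build_procedure_queries user_msg rewritten_query out) := by unfold Spec_build_procedure_queries; infer_instance

-- ===== CLAIM =====
def Claim_equal_build_procedure_queries : Prop := ∀ (user_msg : String) (rewritten_query : String), Dom_build_procedure_queries user_msg rewritten_query → Spec_build_procedure_queries user_msg rewritten_query (build_procedure_queries user_msg rewritten_query)

-- ===== LEMMAS AND PROOFS =====

-- split₀.go with a non-empty starting accumulator just prepends acc.reverse
theorem pv_go_acc (s cur : List Char) (acc : List (List Char)) :
    PySem.Chars.split₀.go s cur acc = acc.reverse ++ PySem.Chars.split₀.go s cur [] := by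
  induction s generalizing cur acc with
  | nil => simp [PySem.Chars.split₀.go]; split_ifs <;> simp
  | cons c rest ih =>
    simp only [PySem.Chars.split₀.go]
    split_ifs with h1 h2
    · exact ih [] acc
    · rw [ih [] (cur.reverse :: acc), ih [] [cur.reverse]]; simp
    · exact ih (c :: cur) acc

-- consuming a run of non-space characters just accumulates them (reversed) onto cur
theorem pv_go_nonspace (w : List Char) (hw : ∀ c ∈ w, PySem.Chars.isspace c = false) :
    ∀ (s cur : List Char) (acc : List (List Char)),
    PySem.Chars.split₀.go (w ++ s) cur acc = PySem.Chars.split₀.go s (w.reverse ++ cur) acc := by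
  induction w with
  | nil => intro s cur acc; simp
  | cons c v ih =>
    intro s cur acc
    have hc : PySem.Chars.isspace c = false := hw c (by simp)
    simp only [List.cons_append, PySem.Chars.split₀.go, hc, Bool.false_eq_true, if_false]
    rw [ih (fun d hd => hw d (by simp [hd])) s (c :: cur) acc]
    simp

-- every word produced by split₀.go is non-empty and space-free
theorem pv_go_words (s : List Char) : ∀ (cur : List Char) (acc : List (List Char)),
    (∀ c ∈ cur, PySem.Chars.isspace c = false) →
    (∀ w ∈ acc, w ≠ [] ∧ ∀ c ∈ w, PySem.Chars.isspace c = false) →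
    ∀ w ∈ PySem.Chars.split₀.go s cur acc, w ≠ [] ∧ ∀ c ∈ w, PySem.Chars.isspace c = false := by
  induction s with
  | nil =>
    intro cur acc hcur hacc w hw
    simp only [PySem.Chars.split₀.go] at hw
    split_ifs at hw with h
    · exact hacc w (by simpa using hw)
    · rcases (by simpa using hw : w ∈ acc ∨ w = cur.reverse) with h1 | h1
      · exact hacc w h1
      · subst h1
        refine ⟨by simpa [List.isEmpty_iff] using h, fun c hc => hcur c (by simpa using hc)⟩
  | cons c rest ih =>
    intro cur acc hcur hacc w hw
    simp only [PySem.Chars.split₀.go] at hw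
    split_ifs at hw with h1 h2
    · exact ih [] acc (by simp) hacc w hw
    · refine ih [] (cur.reverse :: acc) (by simp) ?_ w hw
      intro v hv
      rcases (by simpa using hv : v = cur.reverse ∨ v ∈ acc) with h3 | h3
      · subst h3
        exact ⟨by simpa [List.isEmpty_iff] using h2, fun d hd => hcur d (by simpa using hd)⟩
      · exact hacc v h3
    · refine ih (c :: cur) acc ?_ hacc w hw
      intro d hd
      rcases (by simpa using hd : d = c ∨ d ∈ cur) with h3 | h3
      · subst h3; simpa using h1
      · exact hcur d h3

-- splitting the space-joined list of good words gives the words back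
theorem pv_split_join (ws : List (List Char))
    (h : ∀ w ∈ ws, w ≠ [] ∧ ∀ c ∈ w, PySem.Chars.isspace c = false) :
    PySem.Chars.split₀ (List.intercalate [' '] ws) = ws := by
  induction ws with
  | nil => simp [List.intercalate, PySem.Chars.split₀, PySem.Chars.split₀.go]
  | cons w rest ih =>
    obtain ⟨hne, hns⟩ := h w (by simp)
    cases rest with
    | nil =>
      have : List.intercalate [' '] [w] = w := by simp [List.intercalate]
      rw [this]
      unfold PySem.Chars.split₀
      rw [show w = w ++ [] by simp, pv_go_nonspace w hns [] [] []]
      simp [PySem.Chars.split₀.go, List.isEmpty_iff, hne]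
    | cons v vs =>
      have hstep : List.intercalate [' '] (w :: v :: vs) =
          w ++ (' ' :: List.intercalate [' '] (v :: vs)) := by
        simp [List.intercalate, List.intersperse]
      rw [hstep]
      unfold PySem.Chars.split₀
      rw [pv_go_nonspace w hns (' ' :: List.intercalate [' '] (v :: vs)) [] []]
      have hsp : PySem.Chars.isspace ' ' = true := by decide
      simp only [PySem.Chars.split₀.go, hsp, if_true, List.append_nil,
        List.isEmpty_iff, List.reverse_eq_nil_iff, hne, if_false, List.reverse_reverse]
      rw [pv_go_acc]
      simp only [List.reverse_cons, List.reverse_nil, List.nil_append]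
      rw [show PySem.Chars.split₀.go (List.intercalate [' '] (v :: vs)) [] [] =
            PySem.Chars.split₀ (List.intercalate [' '] (v :: vs)) from rfl,
        ih (fun u hu => h u (by simp [hu]))]
      simp

-- normalization is transparent to split₀
theorem pv_split_norm (s : String) : PySem.Str.split₀ (pvNorm s) = PySem.Str.split₀ s := by
  unfold pvNorm PySem.Str.join PySem.Str.split₀
  have hw : ∀ w ∈ PySem.Chars.split₀ s.toList, w ≠ [] ∧ ∀ c ∈ w, PySem.Chars.isspace c = false :=
    pv_go_words s.toList [] [] (by simp) (by simp)
  have hmap : (List.map String.toList (List.map String.ofList (PySem.Chars.split₀ s.toList)))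
      = PySem.Chars.split₀ s.toList := by
    simp [List.map_map, Function.comp_def]
  simp only [String.toList_ofList, hmap, PySem.Chars.join,
    show (" " : String).toList = [' '] from rfl]
  rw [pv_split_join _ hw]

theorem pv_norm_empty (s : String) : pvNorm s = "" ↔ PySem.Str.split₀ s = [] := by
  constructor
  · intro h
    rw [← pv_split_norm s, h]
    decide
  · intro h
    unfold pvNorm
    rw [h]
    decide

theorem pv_norm_inj (a b : String) : pvNorm a = pvNorm b ↔ PySem.Str.split₀ a = PySem.Str.split₀ b := by
  constructor
  · intro h
    rw [← pv_split_norm a, ← pv_split_norm b, h]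
  · intro h
    unfold pvNorm
    rw [h]

-- A's filter-then-dedup over the two candidates, in closed conditional form
theorem pv_core (msg rewritten : String) :
    (let queries := [msg, rewritten].filter (fun item => !(item == ""));
     if queries = [] then []
     else
       (queries.foldl
         (fun (acc : PySem.Set String × List String) item =>
           if item ∈ acc.1 then acc else (acc.1.add item, acc.2 ++ [item]))
         (PySem.Set.ofList [], [])).2) =
    (if msg ≠ "" then [msg] else []) ++
    (if rewritten ≠ "" ∧ rewritten ≠ msg then [rewritten] else []) := by
  by_cases hm : msg = "" <;> by_cases hr : rewritten = "" <;>
    by_cases he : rewritten = msg <;>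
    simp [hm, hr, he, beq_eq_decide, List.filter, List.foldl,
      PySem.Set.ofList, PySem.Set.add]

-- B in the same closed conditional form
theorem pv_alt_core (u r : String) :
    build_procedure_queries_alt u r =
    (if pvNorm u ≠ "" then [pvNorm u] else []) ++
    (if pvNorm r ≠ "" ∧ pvNorm r ≠ pvNorm u then [pvNorm r] else []) := by
  unfold build_procedure_queries_alt
  simp only [ne_eq, pv_norm_empty, pv_norm_inj]
  by_cases h1 : PySem.Str.split₀ u = [] <;>
    by_cases h2 : PySem.Str.split₀ r = PySem.Str.split₀ u <;>
    by_cases h3 : PySem.Str.split₀ r = [] <;>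
    simp_all [List.filter, beq_eq_decide, pvNorm]

-- ===== VERDICT =====
theorem build_procedure_queries_spec : Claim_equal_build_procedure_queries := by
  intro u r _
  unfold Spec_build_procedure_queries build_procedure_queries
  rw [pv_core (pvNorm u) (pvNorm r), pv_alt_core]
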